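-- pv_equiv track=rewrite | github.com/nbridgland/Advent2022 | python/day25/day25.py | translate_from_snafu
-- ===== SOURCE A (Python) =====
-- def translate_from_snafu(string):
--     output = 0
--     max_power = len(string)
--     for k in range(max_power):
--         if string[k] == '=':
--             output -= 2*5**(max_power-k-1)
--         if string[k] == '-':
--             output -= 5**(max_power-k-1)
--         if string[k] == '1':
--             output += 5**(max_power-k-1)
--         if string[k] == '2':
--             output += 2*5**(max_power-k-1)
--     return output
-- ===== SOURCE B (Python) =====
-- _SNAFU_DIGITS = {'=': -2, '-': -1, '1': 1, '2': 2}
--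
-- def translate_from_snafu(string):
--     output = 0
--     for c in string:
--         output = output * 5 + _SNAFU_DIGITS.get(c, 0)
--     return output
-- ===== Notes on version B (the rewrite author's own statement) =====
-- stated objective: faster
-- what changed: Replaces the per-position power computation 5**(n-k-1) (a fresh bignum exponentiation for every character) with a single left-to-right Horner pass output = output*5 + digit.
import Mathlib
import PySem

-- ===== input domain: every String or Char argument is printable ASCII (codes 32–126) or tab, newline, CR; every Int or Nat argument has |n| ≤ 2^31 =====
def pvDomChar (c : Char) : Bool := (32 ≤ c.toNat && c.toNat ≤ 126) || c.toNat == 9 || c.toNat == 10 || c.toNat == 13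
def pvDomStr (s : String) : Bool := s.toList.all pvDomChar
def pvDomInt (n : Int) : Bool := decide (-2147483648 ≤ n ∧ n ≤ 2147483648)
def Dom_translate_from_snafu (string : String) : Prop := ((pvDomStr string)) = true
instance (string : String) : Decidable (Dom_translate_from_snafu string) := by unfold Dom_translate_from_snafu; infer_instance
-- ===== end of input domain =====

-- B replaces A's per-position 5**(n-k-1) exponentiations with a single Horner pass (output = output*5 + digit); objective: faster.

-- ===== PORT A =====
def translate_from_snafu (string : String) : Int :=
  let cs := string.toList
  let max_power : Int := PySem.List.len cs
  (PySem.List.pyRange 0 max_power 1).foldl (fun output k =>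
    let c := PySem.List.pyGetD cs k ' '   -- string[k]; k is always in range here
    let p : Int := 5 ^ (max_power - k - 1).toNat   -- 5**(max_power-k-1), exponent always ≥ 0
    let output := if c = '=' then output - 2 * p else output
    let output := if c = '-' then output - p else output
    let output := if c = '1' then output + p else output
    let output := if c = '2' then output + 2 * p else output
    output) 0

-- ===== PORT B =====
-- _SNAFU_DIGITS.get(c, 0): literal 4-key dict lookup with default
def snafuDigit (c : Char) : Int :=
  if c = '=' then -2 else if c = '-' then -1 else if c = '1' then 1 else if c = '2' then 2 else 0

def translate_from_snafu_alt (string : String) : Int :=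
  string.toList.foldl (fun output c => output * 5 + snafuDigit c) 0

-- ===== PRECONDITION & SPEC =====
def Spec_translate_from_snafu (string : String) (out : Int) : Prop := out = translate_from_snafu_alt string
instance (string : String) (out : Int) : Decidable (Spec_translate_from_snafu string out) := by unfold Spec_translate_from_snafu; infer_instance

-- ===== CLAIM (what is proved, stated in full; the proofs are below) =====
def Claim_equal_translate_from_snafu : Prop := ∀ (string : String), Dom_translate_from_snafu string → Spec_translate_from_snafu string (translate_from_snafu string)

-- ===== LEMMAS AND PROOFS =====

-- A's four sequential ifs are one signed-digit addition
theorem stepA_eq (o p : Int) (c : Char) :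
    (let o1 := if c = '=' then o - 2 * p else o
     let o2 := if c = '-' then o1 - p else o1
     let o3 := if c = '1' then o2 + p else o2
     if c = '2' then o3 + 2 * p else o3) = o + snafuDigit c * p := by
  simp only [snafuDigit]
  split_ifs <;> simp_all <;> ring

-- the index fold of A equals the Horner fold of B, for any character list
theorem fold_eq (cs : List Char) :
    (PySem.List.pyRange 0 (cs.length : Int) 1).foldl
      (fun o k => o + snafuDigit (PySem.List.pyGetD cs k ' ') * 5 ^ ((cs.length : Int) - k - 1).toNat) 0
    = cs.foldl (fun o c => o * 5 + snafuDigit c) 0 := by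
  induction cs using List.reverseRecOn with
  | nil => simp [PySem.List.pyRange_one_eq_nil]
  | append_singleton cs c ih =>
    have hn : (0 : Int) ≤ (cs.length : Int) := by positivity
    have hlen : ((cs ++ [c]).length : Int) = (cs.length : Int) + 1 := by norm_num [List.length_append]
    rw [hlen, PySem.List.pyRange_one_succ_right hn, List.foldl_append]
    rw [PySem.List.foldl_add, PySem.List.foldl_add]
    rw [PySem.List.foldl_add] at ih
    have hpt : ∀ k ∈ PySem.List.pyRange 0 (cs.length : Int) 1,
        snafuDigit (PySem.List.pyGetD (cs ++ [c]) k ' ') * 5 ^ ((cs.length : Int) + 1 - k - 1).toNat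
        = 5 * (snafuDigit (PySem.List.pyGetD cs k ' ') * 5 ^ ((cs.length : Int) - k - 1).toNat) := by
      intro k hk
      rw [PySem.List.mem_pyRange_one] at hk
      have hklt : k < ((cs ++ [c]).length : Int) := by rw [hlen]; omega
      have hget : PySem.List.pyGetD (cs ++ [c]) k ' ' = PySem.List.pyGetD cs k ' ' := by
        rw [PySem.List.pyGetD_eq_getElem (cs ++ [c]) ' ' (by omega) hklt,
            PySem.List.pyGetD_eq_getElem cs ' ' (by omega) (by omega)]
        exact List.getElem_append_left (by omega)
      have hexp : ((cs.length : Int) + 1 - k - 1).toNat = ((cs.length : Int) - k - 1).toNat + 1 := by omega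
      rw [hget, hexp, pow_succ]
      ring
    rw [List.map_congr_left hpt, List.sum_map_mul_left]
    have hlast : PySem.List.pyGetD (cs ++ [c]) (cs.length : Int) ' ' = c := by
      rw [PySem.List.pyGetD_eq_getElem (cs ++ [c]) ' ' (by omega) (by rw [hlen]; omega)]
      simp
    have hz : ((cs.length : Int) + 1 - (cs.length : Int) - 1).toNat = 0 := by omega
    rw [List.foldl_append]
    simp only [List.map_cons, List.map_nil, List.sum_cons, List.sum_nil, List.foldl_cons,
      List.foldl_nil, hlast, hz, pow_zero, ← ih]
    ring

-- ===== VERDICT (by name: the statement is the Claim_ definition above) =====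
theorem translate_from_snafu_spec : Claim_equal_translate_from_snafu := by
  intro s _
  unfold Spec_translate_from_snafu translate_from_snafu translate_from_snafu_alt
  simp only [PySem.List.len_eq]
  exact (PySem.List.foldl_congr_mem _ _
      (fun o k => o + snafuDigit (PySem.List.pyGetD s.toList k ' ') * 5 ^ ((s.toList.length : Int) - k - 1).toNat)
      0 (fun acc k _ => stepA_eq acc _ _)).trans (fold_eq s.toList)
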